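-- pv_equiv track=rewrite | github.com/DanielAMoreno5775/checkerboard-move-calculator | Determine Number of Moves for Current State of Checkerboard.py | shouldBeKing
-- ===== SOURCE A (Python) =====
-- def shouldBeKing(row, column, currentBoard, isKing):
--     #initialize all variables
--     rowBeingEnteredByPlayer = 0
--     validColumnsBeingEnteredByPlayer = [0 for x in range(2)]
--
--     #determine what squares the player's checker could enter if moving normally
--     rowBeingEnteredByPlayer = row + 1
--     validColumnsBeingEnteredByPlayer[0] = column - 1
--     validColumnsBeingEnteredByPlayer[1] = column + 1
--
--     if not isKing:
--         #start checking whether certain moves are valid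
--         #check whether a move to the left would go off of the board
--         if (not (validColumnsBeingEnteredByPlayer[0] < 0 or rowBeingEnteredByPlayer > 7)):
--             #if there is an opponent checker on the left square
--             if (currentBoard[rowBeingEnteredByPlayer][validColumnsBeingEnteredByPlayer[0]] == "opponent"):
--                 #check whether jump would go off of the board
--                 if (not ((validColumnsBeingEnteredByPlayer[0] - 1) < 0 or (rowBeingEnteredByPlayer + 1) > 7)):
--                     #check whether there is a checker in the jumping spot
--                     if (currentBoard[rowBeingEnteredByPlayer + 1][validColumnsBeingEnteredByPlayer[0] - 1] != "opponent"):
--                         #recursively check whether there are more valid jumps from new location due to multi-jump rule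
--                         isKing = shouldBeKing(rowBeingEnteredByPlayer + 1, validColumnsBeingEnteredByPlayer[0] - 1, currentBoard, isKing)
--                         #check whether the new square would be in the opponent's home row
--                         if ((rowBeingEnteredByPlayer + 1) == 7):
--                             isKing = True
--
--         #check whether a move to the right would go off of the board
--         if (not (validColumnsBeingEnteredByPlayer[1] > 7 or rowBeingEnteredByPlayer > 7)):
--             #if there is an opponent checker on the left square
--             if (currentBoard[rowBeingEnteredByPlayer][validColumnsBeingEnteredByPlayer[1]] == "opponent"):
--                 #check whether jump would go off of the board
--                 if (not ((validColumnsBeingEnteredByPlayer[1] + 1) > 7 or (rowBeingEnteredByPlayer + 1) > 7)):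
--                     #check whether there is a checker in the jumping spot
--                     if (currentBoard[rowBeingEnteredByPlayer + 1][validColumnsBeingEnteredByPlayer[1] + 1] != "opponent"):
--                         #recursively check whether there are more valid jumps from new location due to multi-jump rule
--                         isKing = shouldBeKing(rowBeingEnteredByPlayer + 1, validColumnsBeingEnteredByPlayer[1] + 1, currentBoard, isKing)
--                         #check whether the new square would be in the opponent's home row
--                         if ((rowBeingEnteredByPlayer + 1) == 7):
--                            isKing = True
--
--     return isKing
-- ===== SOURCE B (Python) =====
-- def shouldBeKing(row, column, currentBoard, isKing):
--     if isKing: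
--         return True
--     # explicit worklist search over jump-chain landings instead of threaded recursion
--     stack = [(row, column)]
--     while stack:
--         r, c = stack.pop()
--         for dc in (-1, 1):
--             oc = c + dc          # over-square column
--             lr = r + 2           # landing row
--             lc = c + 2 * dc      # landing column
--             if (0 <= oc <= 7 and r + 1 <= 7 and lr <= 7 and 0 <= lc <= 7
--                     and currentBoard[r + 1][oc] == "opponent"
--                     and currentBoard[lr][lc] != "opponent"):
--                 if lr == 7:
--                     return True
--                 stack.append((lr, lc))
--     return False
-- ===== Notes on version B (the rewrite author's own statement) =====
-- stated objective: alternative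
-- what changed: A's threaded recursion (the recursive result re-fed as the isKing argument of the next call) is replaced by an explicit worklist search: push the start position, pop positions and test the two diagonal jumps, push landings, and return True as soon as a landing reaches row 7.
import Mathlib
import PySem

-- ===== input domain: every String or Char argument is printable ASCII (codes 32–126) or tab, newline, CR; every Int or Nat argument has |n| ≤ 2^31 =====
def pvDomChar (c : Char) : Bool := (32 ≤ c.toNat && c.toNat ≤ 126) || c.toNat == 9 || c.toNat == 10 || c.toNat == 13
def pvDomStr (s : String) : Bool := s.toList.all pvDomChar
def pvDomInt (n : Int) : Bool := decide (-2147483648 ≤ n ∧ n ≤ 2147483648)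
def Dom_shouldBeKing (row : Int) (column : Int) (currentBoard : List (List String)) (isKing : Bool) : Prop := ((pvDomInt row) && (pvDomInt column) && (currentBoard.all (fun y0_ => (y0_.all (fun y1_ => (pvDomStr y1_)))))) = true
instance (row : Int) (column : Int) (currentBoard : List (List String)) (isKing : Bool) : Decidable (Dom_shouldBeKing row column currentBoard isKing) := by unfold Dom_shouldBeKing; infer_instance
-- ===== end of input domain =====

-- B replaces A's threaded recursion by an explicit worklist (stack) search over jump landings; objective: alternative decomposition, same cost.

-- ===== PORT A =====
-- board[i][j]; exact (incl. negative-index wraparound) wherever Python indexing succeeds;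
-- Pre_ excludes the inputs on which Python raises IndexError (there the .getD defaults are never relied on)
def pvCell (b : List (List String)) (i j : Int) : String :=
  (PySem.List.pyGet? ((PySem.List.pyGet? b i).getD []) j).getD ""

def shouldBeKing (row : Int) (column : Int) (currentBoard : List (List String)) (isKing : Bool) : Bool :=
  let rbe := row + 1
  let v0 := column - 1
  let v1 := column + 1
  if !isKing then
    let k1 :=
      if ¬(v0 < 0 ∨ rbe > 7) then
        if pvCell currentBoard rbe v0 = "opponent" then
          if h1 : ¬(v0 - 1 < 0 ∨ rbe + 1 > 7) then
            if pvCell currentBoard (rbe + 1) (v0 - 1) ≠ "opponent" then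
              let k := shouldBeKing (rbe + 1) (v0 - 1) currentBoard isKing
              if rbe + 1 = 7 then true else k
            else isKing
          else isKing
        else isKing
      else isKing
    if ¬(v1 > 7 ∨ rbe > 7) then
      if pvCell currentBoard rbe v1 = "opponent" then
        if h2 : ¬(v1 + 1 > 7 ∨ rbe + 1 > 7) then
          if pvCell currentBoard (rbe + 1) (v1 + 1) ≠ "opponent" then
            let k := shouldBeKing (rbe + 1) (v1 + 1) currentBoard k1
            if rbe + 1 = 7 then true else k
          else k1
        else k1
      else k1
    else k1
  else isKing
termination_by (8 - row).toNat
decreasing_by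
  · simp only [not_or, not_lt] at h1; omega
  · simp only [not_or, not_lt] at h2; omega

-- ===== PORT B =====
-- one diagonal-jump test: over-square and landing on the board, opponent on the over-square, landing not opponent
def pvJump (b : List (List String)) (r c dc : Int) : Bool :=
  decide (0 ≤ c + dc) && decide (c + dc ≤ 7) && decide (r + 1 ≤ 7) && decide (r + 2 ≤ 7) &&
  decide (0 ≤ c + 2 * dc) && decide (c + 2 * dc ≤ 7) &&
  (pvCell b (r + 1) (c + dc) == "opponent") && (pvCell b (r + 2) (c + 2 * dc) != "opponent")

theorem pvJump_le {b : List (List String)} {r c dc : Int} (h : pvJump b r c dc = true) :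
    r + 2 ≤ 7 := by
  simp only [pvJump, Bool.and_eq_true, decide_eq_true_eq] at h
  exact h.1.1.1.1.2

-- the while-loop over the worklist; head of the list = top of the Python stack
def pvLoop (b : List (List String)) : List (Int × Int) → Bool
  | [] => false
  | (r, c) :: rest =>
    if h1 : pvJump b r c (-1) = true then
      if r + 2 = 7 then true
      else if h2 : pvJump b r c 1 = true then
        if r + 2 = 7 then true
        else pvLoop b ((r + 2, c + 2) :: (r + 2, c - 2) :: rest)
      else pvLoop b ((r + 2, c - 2) :: rest)
    else if h2 : pvJump b r c 1 = true then
      if r + 2 = 7 then true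
      else pvLoop b ((r + 2, c + 2) :: rest)
    else pvLoop b rest
termination_by st => ((st.map (fun p => 3 ^ (8 - p.1).toNat)).sum)
decreasing_by
  all_goals simp only [List.map_cons, List.sum_cons]
  · have hr := pvJump_le h1
    have he : (8 - r).toNat = (8 - (r + 2)).toNat + 2 := by omega
    have hp : 1 ≤ 3 ^ (8 - (r + 2)).toNat := Nat.one_le_pow _ _ (by norm_num)
    rw [he, pow_succ, pow_succ]; omega
  · have hr := pvJump_le h1
    have he : (8 - r).toNat = (8 - (r + 2)).toNat + 2 := by omega
    have hp : 1 ≤ 3 ^ (8 - (r + 2)).toNat := Nat.one_le_pow _ _ (by norm_num)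
    rw [he, pow_succ, pow_succ]; omega
  · have hr := pvJump_le h2
    have he : (8 - r).toNat = (8 - (r + 2)).toNat + 2 := by omega
    have hp : 1 ≤ 3 ^ (8 - (r + 2)).toNat := Nat.one_le_pow _ _ (by norm_num)
    rw [he, pow_succ, pow_succ]; omega
  · have hp : 1 ≤ 3 ^ (8 - r).toNat := Nat.one_le_pow _ _ (by norm_num)
    omega

def shouldBeKing_alt (row : Int) (column : Int) (currentBoard : List (List String)) (isKing : Bool) : Bool :=
  if isKing then true
  else pvLoop currentBoard [(row, column)]

-- ===== PRECONDITION & SPEC =====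
-- Pre_ restricts to the natural domain of the task — a full 8×8 board with the checker at a
-- column within it (or inputs A answers without touching the board: isKing, or row ≥ 7) —
-- because outside it Python A either raises IndexError or answers via Python's accidental
-- negative-index wraparound, which a natural B does not reproduce.
def Pre_shouldBeKing (row : Int) (column : Int) (currentBoard : List (List String)) (isKing : Bool) : Prop :=
  isKing = true ∨ 7 ≤ row ∨
  (0 ≤ row ∧ 0 ≤ column ∧ column ≤ 7 ∧ currentBoard.length = 8 ∧ ∀ r ∈ currentBoard, r.length = 8)
instance (row : Int) (column : Int) (currentBoard : List (List String)) (isKing : Bool) : Decidable (Pre_shouldBeKing row column currentBoard isKing) := by unfold Pre_shouldBeKing; infer_instance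

def pvWitness_shouldBeKing : Int × Int × List (List String) × Bool :=
  (5, 2,
   [["", "", "", "", "", "", "", ""], ["", "", "", "", "", "", "", ""],
    ["", "", "", "", "", "", "", ""], ["", "", "", "", "", "", "", ""],
    ["", "", "", "", "", "", "", ""], ["", "", "", "", "", "", "", ""],
    ["", "", "", "opponent", "", "", "", ""], ["", "", "", "", "", "", "", ""]],
   false)

def Spec_shouldBeKing (row : Int) (column : Int) (currentBoard : List (List String)) (isKing : Bool) (out : Bool) : Prop := out = shouldBeKing_alt row column currentBoard isKing
instance (row : Int) (column : Int) (currentBoard : List (List String)) (isKing : Bool) (out : Bool) : Decidable (Spec_shouldBeKing row column currentBoard isKing out) := by unfold Spec_shouldBeKing; infer_instance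

-- ===== CLAIM (what is proved, stated in full; the proofs are below) =====
def Claim_equal_shouldBeKing : Prop := ∀ (row : Int) (column : Int) (currentBoard : List (List String)) (isKing : Bool), Dom_shouldBeKing row column currentBoard isKing → Pre_shouldBeKing row column currentBoard isKing → Spec_shouldBeKing row column currentBoard isKing (shouldBeKing row column currentBoard isKing)

-- ===== LEMMAS AND PROOFS =====

-- 'some jump chain from (r, c) reaches a landing on row 7'
def pvGood (b : List (List String)) (r c : Int) : Bool :=
  (if h : pvJump b r c (-1) = true then (decide (r + 2 = 7) || pvGood b (r + 2) (c - 2)) else false) ||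
  (if h : pvJump b r c 1 = true then (decide (r + 2 = 7) || pvGood b (r + 2) (c + 2)) else false)
termination_by (8 - r).toNat
decreasing_by
  · have := pvJump_le h; omega
  · have := pvJump_le h; omega

-- B's worklist loop answers: 'some position on the stack has a good jump chain'
theorem pvLoop_any (b : List (List String)) (st : List (Int × Int)) :
    pvLoop b st = st.any (fun p => pvGood b p.1 p.2) := by
  induction st using pvLoop.induct b with
  | case1 => simp [pvLoop]
  | case2 r c rest h1 h7 =>
    rw [pvLoop]; simp only [List.any_cons]; rw [pvGood]; simp [h1, h7]
  | case3 r c rest h1 h7 h2 h7' => exact absurd h7' h7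
  | case4 r c rest h1 h7 h2 h7' ih =>
    rw [pvLoop]; simp only [List.any_cons]; rw [pvGood]
    simp only [List.any_cons] at ih
    simp only [dif_pos h1, dif_pos h2, ih, h7, decide_false, Bool.false_or]
    ac_rfl
  | case5 r c rest h1 h7 h2 ih =>
    rw [pvLoop]; simp only [List.any_cons]; rw [pvGood]
    simp only [List.any_cons] at ih
    simp [dif_pos h1, dif_neg h2, ih, h7]
  | case6 r c rest h1 h2 h7 =>
    rw [pvLoop]; simp only [List.any_cons]; rw [pvGood]; simp [h1, h2, h7]
  | case7 r c rest h1 h2 h7 ih =>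
    rw [pvLoop]; simp only [List.any_cons]; rw [pvGood]
    simp only [List.any_cons] at ih
    simp [dif_neg h1, dif_pos h2, ih, h7]
  | case8 r c rest h1 h2 ih =>
    rw [pvLoop]; simp only [List.any_cons]; rw [pvGood]; simp [h1, h2, ih]

theorem shouldBeKing_true (b : List (List String)) (r c : Int) :
    shouldBeKing r c b true = true := by
  rw [shouldBeKing]; simp

theorem pvJump_false_hi {b : List (List String)} {r : Int} (c dc : Int) (h : 7 < r + 1) :
    pvJump b r c dc = false := by
  cases hj : pvJump b r c dc with
  | false => rfl
  | true => have := pvJump_le hj; omega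

theorem shouldBeKing_hi (b : List (List String)) (r c : Int) (h : 7 ≤ r) :
    shouldBeKing r c b false = false := by
  rw [shouldBeKing]
  have h1 : ¬¬(c - 1 < 0 ∨ r + 1 > 7) := by omega
  have h2 : ¬¬(c + 1 > 7 ∨ r + 1 > 7) := by omega
  simp only [Bool.not_false, if_true, if_neg h1, if_neg h2]

theorem pvGood_hi (b : List (List String)) (r c : Int) (h : 7 ≤ r) :
    pvGood b r c = false := by
  rw [pvGood]
  simp [pvJump_false_hi (b := b) (r := r) c (-1) (by omega),
        pvJump_false_hi (b := b) (r := r) c 1 (by omega)]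

theorem if_chain4 {α : Type} (P1 P2 P3 P4 : Prop) [Decidable P1] [Decidable P2] [Decidable P3]
    [Decidable P4] (x e : α) :
    (if P1 then if P2 then if P3 then if P4 then x else e else e else e else e) =
      if P1 ∧ P2 ∧ P3 ∧ P4 then x else e := by
  split_ifs <;> tauto

theorem jumpL_iff (b : List (List String)) (r c : Int) (hc0 : 0 ≤ c) (hc7 : c ≤ 7) :
    (pvJump b r c (-1) = true) ↔
      (¬(c - 1 < 0 ∨ r + 1 > 7) ∧ pvCell b (r + 1) (c - 1) = "opponent" ∧
       ¬(c - 2 < 0 ∨ r + 2 > 7) ∧ pvCell b (r + 2) (c - 2) ≠ "opponent") := by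
  simp only [pvJump, Bool.and_eq_true, decide_eq_true_eq, beq_iff_eq, bne_iff_ne,
    show c + (-1) = c - 1 from by ring, show c + 2 * (-1) = c - 2 from by ring]
  constructor
  · rintro ⟨⟨⟨⟨⟨⟨⟨a1, a2⟩, a3⟩, a4⟩, a5⟩, a6⟩, a7⟩, a8⟩
    exact ⟨by omega, a7, by omega, a8⟩
  · rintro ⟨a1, a2, a3, a4⟩
    exact ⟨⟨⟨⟨⟨⟨⟨by omega, by omega⟩, by omega⟩, by omega⟩, by omega⟩, by omega⟩, a2⟩, a4⟩

theorem jumpR_iff (b : List (List String)) (r c : Int) (hc0 : 0 ≤ c) (hc7 : c ≤ 7) :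
    (pvJump b r c 1 = true) ↔
      (¬(c + 1 > 7 ∨ r + 1 > 7) ∧ pvCell b (r + 1) (c + 1) = "opponent" ∧
       ¬(c + 2 > 7 ∨ r + 2 > 7) ∧ pvCell b (r + 2) (c + 2) ≠ "opponent") := by
  simp only [pvJump, Bool.and_eq_true, decide_eq_true_eq, beq_iff_eq, bne_iff_ne,
    show c + 2 * 1 = c + 2 from by ring]
  constructor
  · rintro ⟨⟨⟨⟨⟨⟨⟨a1, a2⟩, a3⟩, a4⟩, a5⟩, a6⟩, a7⟩, a8⟩
    exact ⟨by omega, a7, by omega, a8⟩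
  · rintro ⟨a1, a2, a3, a4⟩
    exact ⟨⟨⟨⟨⟨⟨⟨by omega, by omega⟩, by omega⟩, by omega⟩, by omega⟩, by omega⟩, a2⟩, a4⟩

-- key bridge: A's nested guards at (r, c) are exactly B's two pvJump tests, under 0 ≤ c ≤ 7
theorem shouldBeKing_unfold (b : List (List String)) (r c : Int)
    (hc0 : 0 ≤ c) (hc7 : c ≤ 7) :
    shouldBeKing r c b false =
      (let k1 := if pvJump b r c (-1) = true then
          (if r + 2 = 7 then true else shouldBeKing (r + 2) (c - 2) b false) else false
       if pvJump b r c 1 = true then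
          (if r + 2 = 7 then true else shouldBeKing (r + 2) (c + 2) b k1) else k1) := by
  rw [shouldBeKing]
  simp only [dite_eq_ite, Bool.not_false, if_true,
    show r + 1 + 1 = r + 2 from by ring, show c - 1 - 1 = c - 2 from by ring,
    show c + 1 + 1 = c + 2 from by ring]
  rw [if_chain4, if_chain4]
  simp only [← jumpL_iff b r c hc0 hc7, ← jumpR_iff b r c hc0 hc7]

theorem pvMain (b : List (List String)) :
    ∀ (n : ℕ) (r c : Int) (k : Bool), (8 - r).toNat ≤ n → 0 ≤ r → 0 ≤ c → c ≤ 7 →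
      shouldBeKing r c b k = (k || pvGood b r c) := by
  intro n
  induction n with
  | zero =>
    intro r c k hn hr hc0 hc7
    cases k with
    | true => simp [shouldBeKing_true]
    | false => rw [shouldBeKing_hi b r c (by omega), pvGood_hi b r c (by omega)]; rfl
  | succ n ih =>
    intro r c k hn hr hc0 hc7
    cases k with
    | true => simp [shouldBeKing_true]
    | false =>
      rw [shouldBeKing_unfold b r c hc0 hc7, pvGood]
      simp only [Bool.false_or]
      by_cases h1 : pvJump b r c (-1) = true
      · have hj1 := h1
        simp only [pvJump, Bool.and_eq_true, decide_eq_true_eq] at hj1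
        have hb1 : 0 ≤ c - 2 ∧ c - 2 ≤ 7 ∧ r + 2 ≤ 7 :=
          ⟨by linarith [hj1.1.1.1.2], by linarith [hj1.1.1.2], hj1.1.1.1.1.2⟩
        have ihL := ih (r + 2) (c - 2) false (by omega) (by omega) hb1.1 hb1.2.1
        by_cases h2 : pvJump b r c 1 = true
        · have hj2 := h2
          simp only [pvJump, Bool.and_eq_true, decide_eq_true_eq] at hj2
          have hb2 : 0 ≤ c + 2 ∧ c + 2 ≤ 7 :=
            ⟨by linarith [hj2.1.1.1.2], by linarith [hj2.1.1.2]⟩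
          by_cases h7 : r + 2 = 7
          · simp [h1, h2, h7]
          · have ihR := fun kk => ih (r + 2) (c + 2) kk (by omega) (by omega) hb2.1 hb2.2
            simp only [h1, h2, if_pos, if_neg h7, dif_pos, ihL, Bool.false_or, ihR]
            cases pvGood b (r + 2) (c - 2) <;> simp [h7]
        · by_cases h7 : r + 2 = 7
          · simp [h1, h2, h7]
          · simp [h1, h2, h7, ihL]
      · by_cases h2 : pvJump b r c 1 = true
        · have hj2 := h2
          simp only [pvJump, Bool.and_eq_true, decide_eq_true_eq] at hj2
          have hb2 : 0 ≤ c + 2 ∧ c + 2 ≤ 7 :=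
            ⟨by linarith [hj2.1.1.1.2], by linarith [hj2.1.1.2]⟩
          by_cases h7 : r + 2 = 7
          · simp [h1, h2, h7]
          · have ihR := ih (r + 2) (c + 2) false (by omega) (by omega) hb2.1 hb2.2
            simp [h1, h2, h7, ihR]
        · simp [h1, h2]

-- ===== VERDICT (by name: the statement is the Claim_ definition above) =====
theorem shouldBeKing_spec : Claim_equal_shouldBeKing := by
  intro row column b isKing _ hpre
  unfold Spec_shouldBeKing shouldBeKing_alt
  cases isKing with
  | true => simp [shouldBeKing_true]
  | false =>
    simp only [Bool.false_eq_true, if_false]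
    rw [pvLoop_any]
    simp only [List.any_cons, List.any_nil, Bool.or_false]
    rcases hpre with h | h | h
    · exact absurd h (by simp)
    · rw [shouldBeKing_hi b row column h, pvGood_hi b row column h]
    · have := pvMain b ((8 - row).toNat) row column false (le_refl _) h.1 h.2.1 h.2.2.1
      simpa using this
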